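-- pv_equiv track=rewrite | github.com/wesleyd/aoc15 | day01a.py | count
-- ===== SOURCE A (Python) =====
-- def count(parens: str) -> int:
--     n = 0
--     for c in parens:
--         if c == '(':
--             n += 1
--         elif c == ')':
--             n -= 1
--     return n
-- ===== SOURCE B (Python) =====
-- def count(parens: str) -> int:
--     # Tabulate all character frequencies in one pass, then read off the two
--     # paren counts from the table.
--     freq = {}
--     for c in parens:
--         freq[c] = freq.get(c, 0) + 1
--     return freq.get('(', 0) - freq.get(')', 0)
-- ===== Notes on version B (the rewrite author's own statement) =====
-- stated objective: alternative
-- what changed: Replaces the branching accumulator loop with a build-then-read tabulation: one pass builds a frequency dictionary of all characters, then the result is a difference of two table lookups.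
import Mathlib
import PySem

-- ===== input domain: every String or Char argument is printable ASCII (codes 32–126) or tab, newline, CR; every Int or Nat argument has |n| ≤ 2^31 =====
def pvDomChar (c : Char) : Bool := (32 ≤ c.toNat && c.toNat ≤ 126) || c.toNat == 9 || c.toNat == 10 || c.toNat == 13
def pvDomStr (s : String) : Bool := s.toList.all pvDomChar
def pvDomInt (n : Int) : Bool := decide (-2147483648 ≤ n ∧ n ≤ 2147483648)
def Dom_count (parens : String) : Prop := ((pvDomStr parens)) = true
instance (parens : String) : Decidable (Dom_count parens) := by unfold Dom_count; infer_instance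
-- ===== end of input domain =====

-- B replaces A's branching accumulator loop with a build-then-read tabulation:
-- one pass builds a frequency dictionary, then two lookups give the answer (alternative, not claimed faster).

-- ===== PORT A =====
-- literal port of A's loop: fold over the characters with the running balance n
def count (parens : String) : Int :=
  parens.toList.foldl
    (fun n c => if c == '(' then n + 1 else if c == ')' then n - 1 else n) 0

-- ===== PORT B =====
-- literal port of B: freq[c] = freq.get(c, 0) + 1 over all chars, then freq.get('(',0) - freq.get(')',0)
def count_alt (parens : String) : Int :=
  let freq : PySem.Dict Char Int :=
    parens.toList.foldl (fun d c => d.insert c (d.getD c 0 + 1)) PySem.Dict.empty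
  freq.getD '(' 0 - freq.getD ')' 0

-- ===== PRECONDITION & SPEC =====
def Spec_count (parens : String) (out : Int) : Prop := out = count_alt parens
instance (parens : String) (out : Int) : Decidable (Spec_count parens out) := by unfold Spec_count; infer_instance

-- ===== CLAIM (what is proved, stated in full; the proofs are below) =====
def Claim_equal_count : Prop := ∀ (parens : String), Dom_count parens → Spec_count parens (count parens)

-- ===== LEMMAS AND PROOFS =====

-- A's fold computes count '(' minus count ')'
theorem foldl_balance (l : List Char) :
    ∀ (n : Int),
      l.foldl (fun n c => if c == '(' then n + 1 else if c == ')' then n - 1 else n) n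
        = n + (l.count '(' : Int) - (l.count ')' : Int) := by
  induction l with
  | nil => intro n; simp
  | cons x t ih =>
    intro n
    simp only [List.foldl_cons, List.count_cons]
    by_cases h1 : x = '('
    · subst h1; rw [ih]; simp; ring
    · by_cases h2 : x = ')'
      · subst h2; rw [ih]; simp; ring
      · have e1 : (x == '(') = false := by simp [h1]
        have e2 : (x == ')') = false := by simp [h2]
        have e3 : ('(' == x) = false := by simp [Ne.symm h1]
        have e4 : (')' == x) = false := by simp [Ne.symm h2]
        rw [e1, e2, ih]
        simp

-- ===== VERDICT (by name: the statement is the Claim_ definition above) =====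
theorem count_spec : Claim_equal_count := by
  intro parens _
  unfold Spec_count count count_alt
  rw [foldl_balance]
  dsimp only
  rw [PySem.Dict.getD_foldl_insert_add_one, PySem.Dict.getD_foldl_insert_add_one]
  simp
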